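-- pv_equiv track=rewrite | github.com/Nazar1985/LearnPython | sberfight/3 fight.py | get_result1
-- ===== SOURCE A (Python) =====
-- def get_result1(numb):
--     d = dict()
--     for n in numb:
--         if n in d:
--             d[n] += 1
--         else:
--             d[n] = 1
--     d = sorted(d.items(), key=lambda x: x[0])
--     c = [z for z in d if z[1] % 2 != 0]
--     return False if len(c) > 1 else True
-- ===== SOURCE B (Python) =====
-- def get_result1(numb):
--     odd = set()
--     for n in numb:
--         if n in odd:
--             odd.discard(n)
--         else:
--             odd.add(n)
--     return len(odd) <= 1
-- ===== Notes on version B (the rewrite author's own statement) =====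
-- stated objective: faster
-- what changed: Replaces the count-dict plus sort-and-filter pipeline with a single pass that toggles each element in a set of currently-odd-count elements, returning len(odd) <= 1.
import Mathlib
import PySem

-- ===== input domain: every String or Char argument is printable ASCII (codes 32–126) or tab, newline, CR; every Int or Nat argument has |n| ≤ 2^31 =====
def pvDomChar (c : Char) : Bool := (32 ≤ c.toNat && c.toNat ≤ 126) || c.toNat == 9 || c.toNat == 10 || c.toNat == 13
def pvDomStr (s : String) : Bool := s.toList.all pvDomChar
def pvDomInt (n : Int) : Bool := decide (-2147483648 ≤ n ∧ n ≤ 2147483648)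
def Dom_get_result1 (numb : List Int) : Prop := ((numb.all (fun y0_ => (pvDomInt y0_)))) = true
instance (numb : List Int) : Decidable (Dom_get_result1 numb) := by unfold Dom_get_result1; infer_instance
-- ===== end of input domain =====

-- B replaces A's count-dict + sort + filter pipeline by a single pass toggling a set of
-- odd-count elements; same result, one traversal, no sorting.


-- ===== PORT A =====
def get_result1 (numb : List Int) : Bool :=
  let d : PySem.Dict Int Int := numb.foldl
    (fun d n => if d.contains n then d.insert n (d.getD n 0 + 1) else d.insert n 1)
    PySem.Dict.empty
  let ds := PySem.List.sorted d.items (fun x => x.1) false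
  let c := ds.filter (fun z => PySem.Int.mod z.2 2 != 0)
  if c.length > 1 then false else true

-- ===== PORT B =====
def get_result1_alt (numb : List Int) : Bool :=
  let odd : PySem.Set Int := numb.foldl
    (fun s n => if PySem.Set.contains s n then PySem.Set.discard s n else PySem.Set.add s n)
    PySem.Set.empty
  decide (PySem.Set.len odd ≤ 1)

-- ===== PRECONDITION & SPEC =====
def Spec_get_result1 (numb : List Int) (out : Bool) : Prop := out = get_result1_alt numb
instance (numb : List Int) (out : Bool) : Decidable (Spec_get_result1 numb out) := by unfold Spec_get_result1; infer_instance

-- ===== CLAIM (what is proved, stated in full; the proofs are below) =====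
def Claim_equal_get_result1 : Prop := ∀ (numb : List Int), Dom_get_result1 numb → Spec_get_result1 numb (get_result1 numb)

-- ===== LEMMAS AND PROOFS =====

-- A's counting loop is exactly Counter(numb)
theorem foldA_eq_counter (numb : List Int) :
    numb.foldl
      (fun d n => if d.contains n then d.insert n (d.getD n 0 + 1) else d.insert n 1)
      PySem.Dict.empty = PySem.Dict.counter numb := by
  rw [PySem.Dict.counter_eq_foldl]
  congr 1
  funext d n
  by_cases h : d.contains n
  · simp [h, PySem.Dict.modify]
  · have hget : d.get? n = none := by
      rw [PySem.Dict.contains_eq_isSome_get?] at h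
      cases hg : d.get? n with
      | none => rfl
      | some v => rw [hg] at h; simp at h
    simp [h, PySem.Dict.modify, PySem.Dict.getD, hget]

-- B's toggle loop: membership in the accumulated set is parity of the count
theorem toggle_inv (l : List Int) : ∀ (s : PySem.Set Int), s.Nodup →
    (l.foldl (fun s n => if PySem.Set.contains s n then PySem.Set.discard s n else PySem.Set.add s n) s).Nodup ∧
    ∀ x : Int, x ∈ l.foldl (fun s n => if PySem.Set.contains s n then PySem.Set.discard s n else PySem.Set.add s n) s ↔
      ((x ∈ s) ↔ l.count x % 2 = 0) := by
  induction l with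
  | nil => intro s hs; refine ⟨hs, ?_⟩; simp
  | cons n t ih =>
    intro s hs
    have hstep : (if PySem.Set.contains s n then PySem.Set.discard s n else PySem.Set.add s n).Nodup := by
      by_cases h : PySem.Set.contains s n
      · simp only [h, if_true]; exact PySem.Set.nodup_discard s n hs
      · simp only [h]; exact PySem.Set.nodup_add s n hs
    obtain ⟨hnd, hmem⟩ := ih _ hstep
    refine ⟨by simpa using hnd, ?_⟩
    intro x
    rw [List.foldl_cons, hmem x]
    by_cases h : PySem.Set.contains s n
    · have hn : n ∈ s := (PySem.Set.contains_iff s n).mp h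
      simp only [h, if_true, PySem.Set.mem_discard]
      by_cases hx : x = n
      · subst hx
        have hpar : (t.count x + 1) % 2 = 0 ↔ ¬ (t.count x % 2 = 0) := by omega
        simp [List.count_cons_self, hpar, hn]
      · simp [mt Eq.symm hx]
        tauto
    · have hn : n ∉ s := by
        intro hmem'
        exact h ((PySem.Set.contains_iff s n).mpr hmem')
      simp only [h]
      by_cases hx : x = n
      · subst hx
        have hpar : (t.count x + 1) % 2 = 0 ↔ ¬ (t.count x % 2 = 0) := by omega
        simp [List.count_cons_self, hpar, hn]
      · simp [mt Eq.symm hx]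
        tauto

-- both sides count the same thing: the number of values of numb with odd multiplicity
theorem lenB_eq (numb : List Int) :
    (numb.foldl (fun s n => if PySem.Set.contains s n then PySem.Set.discard s n else PySem.Set.add s n)
      PySem.Set.empty).length
    = (PySem.Set.ofList numb).countP (fun x => decide (numb.count x % 2 = 1)) := by
  obtain ⟨hnd, hmem⟩ := toggle_inv numb PySem.Set.empty (by simp [PySem.Set.empty])
  rw [List.countP_eq_length_filter]
  apply List.Perm.length_eq
  rw [List.perm_ext_iff_of_nodup hnd ((PySem.Set.nodup_ofList numb).filter _)]
  intro x
  rw [hmem x, List.mem_filter, PySem.Set.mem_ofList]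
  constructor
  · intro hx
    have hodd : numb.count x % 2 = 1 := by
      by_cases hc : numb.count x % 2 = 0
      · exact absurd (hx.mpr hc) (by simp [PySem.Set.empty])
      · omega
    refine ⟨?_, by simpa using hodd⟩
    have : 0 < numb.count x := by omega
    exact List.count_pos_iff.mp this
  · rintro ⟨-, hodd⟩
    simp only [decide_eq_true_eq] at hodd
    constructor
    · intro hx; exact absurd hx (by simp [PySem.Set.empty])
    · intro h0; omega

theorem lenA_eq (numb : List Int) :
    ((PySem.List.sorted
        (numb.foldl
          (fun d n => if d.contains n then d.insert n (d.getD n 0 + 1) else d.insert n 1)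
          PySem.Dict.empty).items (fun x => x.1) false).filter
      (fun z => PySem.Int.mod z.2 2 != 0)).length
    = (PySem.Set.ofList numb).countP (fun x => decide (numb.count x % 2 = 1)) := by
  rw [foldA_eq_counter, ← List.countP_eq_length_filter]
  rw [List.Perm.countP_eq _ (PySem.List.sorted_perm _ _ _)]
  rw [PySem.Dict.items_counter, List.countP_map]
  apply List.countP_congr
  intro k _
  simp only [Function.comp]
  have h2 : PySem.Int.mod ((numb.count k : Int)) 2 = (numb.count k : Int) % 2 :=
    PySem.Int.mod_eq_emod_of_pos (by norm_num)
  constructor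
  · intro h
    have : ¬ ((numb.count k : Int) % 2 = 0) := by
      intro hz; rw [h2, hz] at h; simp at h
    simp only [decide_eq_true_eq]; omega
  · intro h
    simp only [decide_eq_true_eq] at h
    rw [bne_iff_ne, h2]
    omega

-- ===== VERDICT (by name: the statement is the Claim_ definition above) =====
theorem if_gt_one_eq_decide_le_one (L : Nat) :
    (if L > 1 then false else true) = decide ((L : Int) ≤ 1) := by
  by_cases h : 1 < L
  · rw [if_pos h, eq_comm, decide_eq_false_iff_not]
    omega
  · rw [if_neg h, eq_comm, decide_eq_true_eq]
    omega

theorem get_result1_spec : Claim_equal_get_result1 := by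
  intro numb _
  simp only [Spec_get_result1, get_result1, get_result1_alt, PySem.Set.len]
  rw [(lenA_eq numb).trans (lenB_eq numb).symm, if_gt_one_eq_decide_le_one]
  rfl
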